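-- pv_equiv track=rewrite | github.com/KarlKarindi/thesisanalyzer | ThesisAnalyzer/Services/Analysis/Style/overused_word_analyzer.py | sentences_are_connected
-- ===== SOURCE A (Python) =====
-- def sentences_are_connected(sentences_in_cluster):
--     """ Checks whether sentences are connected.
--         Sentences are connected when the indexes are right after each other.
--         Returns (boolean) - whether sentences are connected or not.
--     """
--     connected = True
--
--     prev = None
--     for sent in sentences_in_cluster:
--         current = sent["index"]
--         if prev is not None and current - prev != 1:
--             connected = False
--         prev = current
--
--     return connected
-- ===== SOURCE B (Python) =====
-- def sentences_are_connected(sentences_in_cluster):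
--     idx = [sent["index"] for sent in sentences_in_cluster]
--     return not idx or idx == list(range(idx[0], idx[0] + len(idx)))
-- ===== Notes on version B (the rewrite author's own statement) =====
-- stated objective: simpler
-- what changed: Replaces the stateful prev/connected scan with extracting the index list once and comparing it to the single expected consecutive range.
import Mathlib
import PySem

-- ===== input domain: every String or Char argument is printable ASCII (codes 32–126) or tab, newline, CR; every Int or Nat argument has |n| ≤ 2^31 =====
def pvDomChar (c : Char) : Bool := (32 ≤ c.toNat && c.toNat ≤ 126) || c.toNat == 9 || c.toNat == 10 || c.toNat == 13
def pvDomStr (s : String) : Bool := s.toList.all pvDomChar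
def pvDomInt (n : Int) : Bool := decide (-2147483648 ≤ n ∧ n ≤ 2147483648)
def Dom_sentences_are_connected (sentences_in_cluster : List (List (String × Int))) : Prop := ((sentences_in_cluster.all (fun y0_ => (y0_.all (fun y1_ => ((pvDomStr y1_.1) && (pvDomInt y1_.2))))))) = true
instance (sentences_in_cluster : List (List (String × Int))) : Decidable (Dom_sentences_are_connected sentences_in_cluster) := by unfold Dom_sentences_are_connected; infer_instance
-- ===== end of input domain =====

-- B replaces A's stateful prev/connected scan by extracting the index list once and
-- comparing it to the single expected consecutive range (objective: simpler).


-- sent["index"]: first-match association-list lookup; Pre_ guarantees the key is present,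
-- so the .getD 0 default is never reached on admitted inputs.
def pvIndexOf (sent : List (String × Int)) : Int :=
  ((PySem.Dict.mk sent).get? "index").getD 0

-- ===== PORT A =====
def sentences_are_connected (sentences_in_cluster : List (List (String × Int))) : Bool :=
  (sentences_in_cluster.foldl
    (fun (st : Bool × Option Int) sent =>
      let current := pvIndexOf sent
      match st.2 with
      | none => (st.1, some current)
      | some prev => (if current - prev ≠ 1 then false else st.1, some current))
    (true, none)).1

-- ===== PORT B =====
def sentences_are_connected_alt (sentences_in_cluster : List (List (String × Int))) : Bool :=
  let idx := sentences_in_cluster.map pvIndexOf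
  match idx with
  | [] => true
  | i :: _ => decide (idx = (List.range idx.length).map (fun k : Nat => i + (k : Int)))

-- ===== PRECONDITION & SPEC =====
-- Pre_ excludes sentences missing the "index" key, on which Python A raises KeyError.
def Pre_sentences_are_connected (sentences_in_cluster : List (List (String × Int))) : Prop :=
  ∀ sent ∈ sentences_in_cluster, "index" ∈ sent.map Prod.fst
instance (sentences_in_cluster : List (List (String × Int))) : Decidable (Pre_sentences_are_connected sentences_in_cluster) := by unfold Pre_sentences_are_connected; infer_instance
def pvWitness_sentences_are_connected : (List (List (String × Int))) := [[("index", 3)], [("index", 4)]]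

def Spec_sentences_are_connected (sentences_in_cluster : List (List (String × Int))) (out : Bool) : Prop := out = sentences_are_connected_alt sentences_in_cluster
instance (sentences_in_cluster : List (List (String × Int))) (out : Bool) : Decidable (Spec_sentences_are_connected sentences_in_cluster out) := by unfold Spec_sentences_are_connected; infer_instance

-- ===== CLAIM (what is proved, stated in full; the proofs are below) =====
def Claim_equal_sentences_are_connected : Prop := ∀ (sentences_in_cluster : List (List (String × Int))), Dom_sentences_are_connected sentences_in_cluster → Pre_sentences_are_connected sentences_in_cluster → Spec_sentences_are_connected sentences_in_cluster (sentences_are_connected sentences_in_cluster)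

-- ===== LEMMAS AND PROOFS =====

def stepA (st : Bool × Option Int) (current : Int) : Bool × Option Int :=
  match st.2 with
  | none => (st.1, some current)
  | some prev => (if current - prev ≠ 1 then false else st.1, some current)

def consec (p : Int) : List Int → Bool
  | [] => true
  | y :: t => (decide (y - p = 1)) && consec y t

lemma foldA (ys : List Int) (c : Bool) (p : Int) :
    (ys.foldl stepA (c, some p)).1 = (c && consec p ys) := by
  induction ys generalizing c p with
  | nil => simp [consec]
  | cons y t ih =>
      by_cases h : y - p = 1 <;>
        simp [List.foldl_cons, stepA, h, ih, consec]

lemma range_map_succ (c : Int) (n : Nat) :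
    (List.range (n + 1)).map (fun k : Nat => c + (k : Int)) =
      c :: (List.range n).map (fun k : Nat => c + 1 + (k : Int)) := by
  rw [List.range_succ_eq_map, List.map_cons, List.map_map]
  congr 1
  · simp
  · exact List.map_congr_left (fun k _ => by simp [Function.comp]; ring)

lemma consec_range (t : List Int) (p : Int) :
    consec p t = decide (t = (List.range t.length).map (fun k : Nat => p + 1 + (k : Int))) := by
  induction t generalizing p with
  | nil => simp [consec]
  | cons y t ih =>
      show (decide (y - p = 1) && consec y t) = _
      rw [ih, List.length_cons, range_map_succ (p + 1) t.length]
      by_cases h : y = p + 1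
      · subst h
        simp
      · have h' : y - p ≠ 1 := by omega
        simp [h, h']

lemma A_as_fold (xs : List (List (String × Int))) :
    sentences_are_connected xs = ((xs.map pvIndexOf).foldl stepA (true, none)).1 := by
  rw [List.foldl_map]; rfl

theorem sentences_are_connected_eq (xs : List (List (String × Int))) :
    sentences_are_connected xs = sentences_are_connected_alt xs := by
  cases xs with
  | nil => rfl
  | cons s rest =>
      rw [A_as_fold]
      have hstep : stepA (true, none) (pvIndexOf s) = (true, some (pvIndexOf s)) := rfl
      rw [List.map_cons, List.foldl_cons, hstep, foldA, Bool.true_and, consec_range]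
      show _ = sentences_are_connected_alt (s :: rest)
      simp only [sentences_are_connected_alt, List.map_cons, List.length_cons]
      simp [range_map_succ]

-- ===== VERDICT (by name: the statement is the Claim_ definition above) =====
theorem sentences_are_connected_spec : Claim_equal_sentences_are_connected := by
  intro xs _ _
  exact (sentences_are_connected_eq xs).symm ▸ rfl
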